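-- pv_equiv track=rewrite | github.com/kcentric/deep_nlp_on_sf_literature | Archive/Cleaning/cleaning_script.py | find_distances_between_instances
-- ===== SOURCE A (Python) =====
-- def find_distances_between_instances(array, word):
--     """Returns a list that contains the distances between each instance of the word, in order. The first value in the
--     output list will be the distance between the FIRST and SECOND instances of the word: NOT the distance from the
--     BEGINNING of the text."""
--
--     if word not in array:
--         return []
--
--     our_iterable = [elem for elem in array]  # make a separate iterable as a copy of the input array so we don't mess
--                                              # that one up
--     first_index = our_iterable.index(word)  # assign the index of the first instance of our value in the list.
--                                             # This is because from here we can find the distance between this and the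
--                                             # next occurrence of our value, and so on.
--     our_iterable[first_index] += "a"  # change the element, so that this element is no longer the first instance of our
--                                       # value when index() is called on the next iteration
--     current_index = first_index
--     distances = []
--     for i in range(first_index, len(our_iterable)):  # loop iterating from the first index of our value to the end of
--                                                      # the list
--         elem = our_iterable[i]
--         if elem == word:
--             index = our_iterable.index(elem)
--             distance = index - current_index  # find the distance between this instance of the element and the previous
--                                               # by subtracting indices
--             distances.append(distance)
--             current_index = index  # now we will shift so that we can find the next distance next time
--             our_iterable[i] += "a"  # change the element, so that this element is no longer the first instance of our
--                                     # value when index() is called on the next iteration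
--
--     return distances
-- ===== SOURCE B (Python) =====
-- def find_distances_between_instances(array, word):
--     """Single pass: remember the index of the previous occurrence of word and
--     append the difference on each subsequent occurrence."""
--     distances = []
--     prev = -1
--     for i, elem in enumerate(array):
--         if elem == word:
--             if prev >= 0:
--                 distances.append(i - prev)
--             prev = i
--     return distances
-- ===== Notes on version B (the rewrite author's own statement) =====
-- stated objective: idiomatic
-- what changed: Replaced the membership pre-check, list copy, element mutation and repeated list.index() scans with a single enumerate pass that tracks the previous occurrence index and appends differences.
import Mathlib
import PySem

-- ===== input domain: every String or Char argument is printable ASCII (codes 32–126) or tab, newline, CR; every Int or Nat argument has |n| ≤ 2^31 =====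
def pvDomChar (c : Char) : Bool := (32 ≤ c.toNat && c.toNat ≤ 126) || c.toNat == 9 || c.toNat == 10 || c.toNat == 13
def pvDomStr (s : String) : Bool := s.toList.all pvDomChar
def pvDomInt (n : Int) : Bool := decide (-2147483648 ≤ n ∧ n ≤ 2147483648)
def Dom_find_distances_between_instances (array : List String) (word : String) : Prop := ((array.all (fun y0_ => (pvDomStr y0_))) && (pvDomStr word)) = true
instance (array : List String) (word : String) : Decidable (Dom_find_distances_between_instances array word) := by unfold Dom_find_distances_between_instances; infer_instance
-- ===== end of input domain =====

-- B replaces A's membership pre-check, list copy, mutation and repeated list.index()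
-- scans with one idiomatic enumerate pass tracking the previous occurrence index.

-- ===== PORT A =====
-- the body of A's for-loop (state = (our_iterable, current_index, distances))
def pvAStep (word : String) (s : List String × Int × List Int) (i : Int) : List String × Int × List Int :=
  let elem := (PySem.List.pyGet? s.1 i).getD ""
  if elem == word then
    let idx : Nat := (PySem.List.index? s.1 elem).getD 0
    (s.1.set i.toNat (elem ++ "a"), (idx : Int), s.2.2 ++ [(idx : Int) - s.2.1])
  else s

def find_distances_between_instances (array : List String) (word : String) : List Int :=
  if array.contains word then
    let our_iterable := array.map (fun elem => elem)
    let first_index : Nat := (PySem.List.index? our_iterable word).getD 0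
    let our_iterable := our_iterable.set first_index
      (((PySem.List.pyGet? our_iterable (first_index : Int)).getD "") ++ "a")
    let st := (PySem.List.pyRange (first_index : Int) (our_iterable.length : Int)).foldl
      (pvAStep word) (our_iterable, (first_index : Int), [])
    st.2.2
  else []

-- ===== PORT B =====
-- the body of B's for-loop (state = (prev, distances))
def pvBStep (word : String) (st : Int × List Int) (p : Int × String) : Int × List Int :=
  if p.2 == word then (p.1, if 0 ≤ st.1 then st.2 ++ [p.1 - st.1] else st.2) else st

def find_distances_between_instances_alt (array : List String) (word : String) : List Int :=
  ((PySem.List.enumerate array 0).foldl (pvBStep word) (-1, [])).2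

-- ===== PRECONDITION & SPEC =====
def Spec_find_distances_between_instances (array : List String) (word : String) (out : List Int) : Prop := out = find_distances_between_instances_alt array word
instance (array : List String) (word : String) (out : List Int) : Decidable (Spec_find_distances_between_instances array word out) := by unfold Spec_find_distances_between_instances; infer_instance

-- ===== CLAIM (what is proved, stated in full; the proofs are below) =====
def Claim_equal_find_distances_between_instances : Prop := ∀ (array : List String) (word : String), Dom_find_distances_between_instances array word → Spec_find_distances_between_instances array word (find_distances_between_instances array word)

-- ===== LEMMAS AND PROOFS =====

-- canonical "gaps" recursion both loops are reduced to
def pvCore (word : String) : Int → List (Int × String) → List Int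
  | _, [] => []
  | cur, (i, s) :: rest => if s == word then (i - cur) :: pvCore word i rest else pvCore word cur rest

-- B before its first match: skip until the first occurrence, then pvCore
def pvPre (word : String) : List String → Int → List Int
  | [], _ => []
  | x :: t, k => if x == word then pvCore word k (PySem.List.enumerate t (k + 1)) else pvPre word t (k + 1)

lemma append_a_ne (s : String) : ¬ (s ++ "a" = s) := by
  intro h
  have := congrArg String.length h
  simp [String.length_append] at this

lemma B_after (word : String) (l : List String) :
    ∀ (k prev : Int) (acc : List Int), 0 ≤ k → 0 ≤ prev →
    ((PySem.List.enumerate l k).foldl (pvBStep word) (prev, acc)).2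
      = acc ++ pvCore word prev (PySem.List.enumerate l k) := by
  induction l with
  | nil => intro k prev acc _ _; simp [PySem.List.enumerate, pvCore]
  | cons x t ih =>
    intro k prev acc hk hprev
    show ((PySem.List.enumerate t (k+1)).foldl (pvBStep word) (pvBStep word (prev, acc) (k, x))).2
          = acc ++ pvCore word prev ((k, x) :: PySem.List.enumerate t (k+1))
    by_cases hx : x == word
    · simp only [pvBStep, hx, if_pos, hprev, pvCore]
      rw [ih (k+1) k (acc ++ [k - prev]) (by omega) hk]
      simp only [List.append_assoc, List.singleton_append]
    · simp only [pvBStep, hx, if_neg, Bool.false_eq_true, not_false_iff, pvCore]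
      rw [ih (k+1) prev acc (by omega) hprev]

lemma B_before (word : String) (l : List String) :
    ∀ (k : Int), 0 ≤ k →
    ((PySem.List.enumerate l k).foldl (pvBStep word) (-1, [])).2 = pvPre word l k := by
  induction l with
  | nil => intro k _; simp [PySem.List.enumerate, pvPre]
  | cons x t ih =>
    intro k hk
    show ((PySem.List.enumerate t (k+1)).foldl (pvBStep word) (pvBStep word (-1, []) (k, x))).2
          = pvPre word (x :: t) k
    by_cases hx : x == word
    · simp only [pvBStep, hx, if_pos, pvPre]
      have : ¬ (0 : Int) ≤ -1 := by omega
      simp only [this, if_false]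
      rw [B_after word t (k+1) k [] (by omega) hk]
      simp
    · simp only [pvBStep, hx, if_neg, Bool.false_eq_true, not_false_iff, pvPre]
      rw [ih (k+1) (by omega)]

lemma pre_of_not_mem (word : String) (l : List String) (h : word ∉ l) :
    ∀ k : Int, pvPre word l k = [] := by
  induction l with
  | nil => intro k; simp [pvPre]
  | cons x t ih =>
    intro k
    have hx : ¬ (x == word) := by
      simp only [beq_iff_eq]; intro hh; exact h (hh ▸ List.mem_cons_self)
    simp only [pvPre, hx, if_neg, Bool.false_eq_true, not_false_iff]
    exact ih (fun hm => h (List.mem_cons_of_mem _ hm)) (k + 1)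

lemma pre_first_match (word : String) :
    ∀ (l : List String) (a : Nat) (k : Int),
    (∀ j, j < a → l[j]? ≠ some word) → l[a]? = some word →
    pvPre word l k = pvCore word (k + a) (PySem.List.enumerate (l.drop (a + 1)) (k + a + 1)) := by
  intro l
  induction l with
  | nil => intro a k _ ha; simp at ha
  | cons x t ih =>
    intro a k hlt ha
    cases a with
    | zero =>
      simp only [List.getElem?_cons_zero, Option.some.injEq] at ha
      simp [pvPre, ha]
    | succ a' =>
      have hx : ¬ (x == word) := by
        simp only [beq_iff_eq]
        intro hh
        exact (hlt 0 (Nat.succ_pos _)) (by simp [hh])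
      simp only [pvPre, hx, if_neg, Bool.false_eq_true, not_false_iff]
      rw [ih a' (k + 1) (fun j hj => by
            have := hlt (j + 1) (by omega)
            simpa using this) (by simpa using ha)]
      have h1 : k + 1 + (a' : Int) = k + (a' + 1 : Nat) := by push_cast; ring
      have h2 : k + 1 + (a' : Int) + 1 = k + (a' + 1 : Nat) + 1 := by push_cast; ring
      rw [h1]
      rfl

-- A's loop, from position a on, with the invariant that lst has no occurrence of word
-- before a and still agrees with array from a on
lemma A_loop (array : List String) (word : String) :
    ∀ (d a : Nat) (lst : List String) (cur : Int) (acc : List Int),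
    a + d = array.length →
    lst.length = array.length →
    (∀ j, j < a → lst[j]? ≠ some word) →
    (∀ j, a ≤ j → lst[j]? = array[j]?) →
    ((PySem.List.pyRange (a : Int) (array.length : Int)).foldl (pvAStep word) (lst, cur, acc)).2.2
      = acc ++ pvCore word cur (PySem.List.enumerate (array.drop a) a) := by
  intro d
  induction d with
  | zero =>
    intro a lst cur acc hlen _ _ _
    have : (PySem.List.pyRange (a : Int) (array.length : Int)) = [] := by
      simp [PySem.List.pyRange]; omega
    rw [this]
    have : array.drop a = [] := List.drop_eq_nil_of_le (by omega)
    simp [this, pvCore]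
  | succ d ih =>
    intro a lst cur acc hlen hl hpre hsuf
    have halt : a < array.length := by omega
    rw [PySem.List.pyRange_one_cons (by exact_mod_cast halt)]
    have hx : (a : Int) + 1 = ((a + 1 : Nat) : Int) := by push_cast; ring
    rw [List.foldl_cons, hx]
    have hget : (PySem.List.pyGet? lst (a : Int)).getD "" = array[a]'halt := by
      rw [PySem.List.pyGet?_natCast, hsuf a (le_refl a), List.getElem?_eq_getElem halt]
      rfl
    have hdrop : array.drop a = array[a]'halt :: array.drop (a + 1) :=
      List.drop_eq_getElem_cons halt
    by_cases hw : array[a]'halt == word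
    · -- the element at a is word: index? finds exactly a
      have hwEq : array[a]'halt = word := by simpa using hw
      have hidx : PySem.List.index? lst word = some a := by
        show List.idxOf? word lst = some a
        rw [List.idxOf?_eq_some_iff]
        refine ⟨by omega, ?_, ?_⟩
        · have := hsuf a (le_refl a)
          have h2 : lst[a]? = some word := by rw [this, List.getElem?_eq_getElem halt, hwEq]
          rw [List.getElem?_eq_getElem (by omega)] at h2
          simpa using h2
        · intro j hj
          have := hpre j (by omega)
          intro hcon
          exact this (by rw [List.getElem?_eq_getElem (by omega)]; simp [hcon])
      have hstep : pvAStep word (lst, cur, acc) (a : Int)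
          = (lst.set a (word ++ "a"), (a : Int), acc ++ [(a : Int) - cur]) := by
        simp only [pvAStep, hget, hwEq, hidx]
        simp
      rw [hstep]
      rw [ih (a + 1) (lst.set a (word ++ "a")) (a : Int) (acc ++ [(a : Int) - cur])
            (by omega) (by simpa using hl)
            (fun j hj => by
              by_cases hja : j = a
              · subst hja
                rw [List.getElem?_set_self (by omega)]
                intro hc
                exact append_a_ne word (by simpa using hc)
              · rw [List.getElem?_set_ne (Ne.symm hja)]
                exact hpre j (by omega))
            (fun j hj => by
              rw [List.getElem?_set_ne (by omega)]
              exact hsuf j (by omega))]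
      rw [hdrop]
      show acc ++ [(a:Int) - cur] ++ pvCore word a (PySem.List.enumerate (array.drop (a+1)) (a+1))
            = acc ++ pvCore word cur ((a, array[a]'halt) :: PySem.List.enumerate (array.drop (a+1)) ((a:Int)+1))
      simp only [pvCore, hw, if_pos, hx]
      simp
    · -- not word: state unchanged
      have hstep : pvAStep word (lst, cur, acc) (a : Int) = (lst, cur, acc) := by
        simp only [pvAStep, hget, hw, if_neg, Bool.false_eq_true, not_false_iff]
      rw [hstep]
      rw [ih (a + 1) lst cur acc (by omega) hl
            (fun j hj => by
              by_cases hja : j = a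
              · subst hja
                rw [hsuf j (le_refl j), List.getElem?_eq_getElem halt]
                intro hc
                have hcw : array[j]'halt = word := by simpa using hc
                exact hw (by simp [hcw])
              · exact hpre j (by omega))
            (fun j hj => hsuf j (by omega))]
      rw [hdrop]
      show acc ++ pvCore word cur (PySem.List.enumerate (array.drop (a+1)) (a+1))
            = acc ++ pvCore word cur ((a, array[a]'halt) :: PySem.List.enumerate (array.drop (a+1)) ((a:Int)+1))
      simp only [pvCore, hw, if_neg, Bool.false_eq_true, not_false_iff, hx]

-- ===== VERDICT (by name: the statement is the Claim_ definition above) =====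
theorem find_distances_between_instances_spec : Claim_equal_find_distances_between_instances := by
  intro array word _
  show find_distances_between_instances array word = find_distances_between_instances_alt array word
  unfold find_distances_between_instances find_distances_between_instances_alt
  rw [B_before word array 0 (le_refl 0)]
  by_cases hmem : word ∈ array
  · simp only [List.contains_iff_mem, hmem, if_pos, List.map_id']
    obtain ⟨a, ha⟩ : ∃ a, List.idxOf? word array = some a := by
      have := (List.isSome_idxOf? (l := array) (a := word)).mpr hmem
      exact Option.isSome_iff_exists.mp this
    obtain ⟨halt, hgetw, hprev⟩ := List.idxOf?_eq_some_iff.mp ha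
    have hidx : PySem.List.index? array word = some a := ha
    rw [hidx]
    simp only [Option.getD_some]
    have hget : (PySem.List.pyGet? array (a : Int)).getD "" = word := by
      rw [PySem.List.pyGet?_natCast, List.getElem?_eq_getElem halt]
      simpa using hgetw
    rw [hget]
    -- peel the first loop iteration (i = a): the element there is word ++ "a", skipped
    have hlen : (array.set a (word ++ "a")).length = array.length := by simp
    rw [hlen]
    rw [PySem.List.pyRange_one_cons (by exact_mod_cast halt)]
    rw [List.foldl_cons]
    have hstep : pvAStep word (array.set a (word ++ "a"), (a : Int), []) (a : Int)
        = (array.set a (word ++ "a"), (a : Int), []) := by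
      have hg : (PySem.List.pyGet? (array.set a (word ++ "a")) (a : Int)).getD "" = word ++ "a" := by
        rw [PySem.List.pyGet?_natCast, List.getElem?_set_self halt]
        simp
      have hne : ¬ ((word ++ "a") == word) := by
        simp only [beq_iff_eq]; exact append_a_ne word
      simp only [pvAStep, hg, hne, if_neg, Bool.false_eq_true, not_false_iff]
    rw [hstep]
    have hx : (a : Int) + 1 = ((a + 1 : Nat) : Int) := by push_cast; ring
    rw [hx]
    rw [A_loop array word (array.length - (a + 1)) (a + 1) (array.set a (word ++ "a")) (a : Int) []
          (by omega) (by simp)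
          (fun j hj => by
            by_cases hja : j = a
            · subst hja
              rw [List.getElem?_set_self halt]
              intro hc
              exact append_a_ne word (by simpa using hc)
            · rw [List.getElem?_set_ne (Ne.symm hja)]
              intro hc
              have hjlt : j < a := by omega
              have := hprev j hjlt
              rw [List.getElem?_eq_getElem (by omega)] at hc
              exact this (by simp at hc; simp [hc]))
          (fun j hj => List.getElem?_set_ne (by omega))]
    rw [pre_first_match word array a 0
          (fun j hj => by
            intro hc
            rw [List.getElem?_eq_getElem (by omega)] at hc
            exact hprev j hj (by simpa using hc))
          (by rw [List.getElem?_eq_getElem halt]; simpa using hgetw)]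
    simp
  · simp only [List.contains_iff_mem, hmem, if_neg, not_false_iff]
    rw [pre_of_not_mem word array hmem 0]
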